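-- pv_equiv track=rewrite | github.com/ruggfrancesco/project-euler-solutions | problem150/problem150.py | gen_triangle
-- ===== SOURCE A (Python) =====
-- def gen_triangle(lst, i=0, j=0, k=0):
-- 	triangle = []
-- 	while(j+i < len(lst)):
-- 		triangle.append(lst[j:k+1])
-- 		i += 1
-- 		j = k+1
-- 		k = j+i
-- 	return triangle
-- ===== SOURCE B (Python) =====
-- def gen_triangle(lst, i=0, j=0, k=0):
--     # Single element-wise pass: emit the first row as the given slice, then
--     # chunk the remaining elements with a row accumulator and a growing target
--     # length, dropping the incomplete trailing row.
--     n = len(lst)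
--     if j + i >= n:
--         return []
--     result = [lst[j:k+1]]
--     row = []
--     target = i + 2
--     for x in lst[k+1:]:
--         row.append(x)
--         if len(row) == target:
--             result.append(row)
--             row = []
--             target += 1
--     return result
-- ===== Notes on version B (the rewrite author's own statement) =====
-- stated objective: alternative
-- what changed: A's three-counter while loop that slices a row per iteration is replaced by one element-wise pass over the remaining elements with a row accumulator and a growing target length (no slicing inside the loop); the incomplete trailing row is never flushed, matching A.
-- intended difference: On degenerate negative counter states (i <= -2 or k <= -2, with the loop entered and a second row reachable) A's slices wrap around via Python negative indexing and emit empty or overlapping rows, while B emits the clean contiguous triangular rows, which is the intended partition; the counters are internal and every real call starts them at zero. — e.g. on gen_triangle([1, 2, 3, 4], 0, 0, -3): A returns [[1, 2], [], [1, 2, 3]], B returns [[1, 2], [3, 4]]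
import Mathlib
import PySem

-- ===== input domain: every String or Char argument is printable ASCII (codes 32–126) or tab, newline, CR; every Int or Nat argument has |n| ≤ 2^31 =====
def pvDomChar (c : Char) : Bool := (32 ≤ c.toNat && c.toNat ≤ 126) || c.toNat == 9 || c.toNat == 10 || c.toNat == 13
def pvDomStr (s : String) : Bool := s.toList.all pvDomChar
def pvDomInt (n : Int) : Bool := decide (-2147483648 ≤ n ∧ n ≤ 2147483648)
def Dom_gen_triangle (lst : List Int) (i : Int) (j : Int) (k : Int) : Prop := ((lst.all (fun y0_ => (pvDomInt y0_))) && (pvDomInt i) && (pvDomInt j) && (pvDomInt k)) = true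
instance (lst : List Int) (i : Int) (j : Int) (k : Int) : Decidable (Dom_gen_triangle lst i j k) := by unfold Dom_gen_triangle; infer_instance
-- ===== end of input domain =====

-- B replaces A's three-counter while loop of slices by a single element-wise pass
-- with a row accumulator and a growing target length (objective: alternative
-- decomposition); on degenerate negative counter states (D_ below) A's Python
-- slices wrap around and the two differ — B returns the clean triangular rows.
-- (A's loop port carries a Nat fuel as a totality guard only.)

-- ===== PORT A =====
-- fuel bound for A's while loop: a + a² covers the iterations with a non-positive
-- step of k (a = (-(i+2)).toNat), then k grows by ≥ 1 per iteration up to len(lst)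
def fuelA (lst : List Int) (i : Int) (_j : Int) (k : Int) : Nat :=
  (-(i + 2)).toNat + (-(i + 2)).toNat * (-(i + 2)).toNat + ((lst.length : Int) - k).toNat + 4

-- the while loop of A, state (triangle, i, j, k)
def loopA (lst : List Int) (triangle : List (List Int)) (i : Int) (j : Int) (k : Int) : Nat → List (List Int)
  | 0 => triangle
  | fuel + 1 =>
    if j + i < (lst.length : Int) then
      loopA lst (triangle ++ [PySem.List.slice lst (some j) (some (k + 1))]) (i + 1) (k + 1) ((k + 1) + (i + 1)) fuel
    else triangle

def gen_triangle (lst : List Int) (i : Int) (j : Int) (k : Int) : List (List Int) :=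
  loopA lst [] i j k (fuelA lst i j k)

-- ===== PORT B =====
-- one step of B's for loop: state (result, row, target), element x
def stepB (st : List (List Int) × List Int × Int) (x : Int) : List (List Int) × List Int × Int :=
  let row := st.2.1 ++ [x]
  if (row.length : Int) = st.2.2 then (st.1 ++ [row], [], st.2.2 + 1)
  else (st.1, row, st.2.2)

def gen_triangle_alt (lst : List Int) (i : Int) (j : Int) (k : Int) : List (List Int) :=
  if (lst.length : Int) ≤ j + i then []
  else
    ((PySem.List.slice lst (some (k + 1)) none).foldl stepB
      ([PySem.List.slice lst (some j) (some (k + 1))], [], i + 2)).1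

-- ===== PRECONDITION & SPEC =====
-- On degenerate negative counter states (i ≤ -2 or k ≤ -2, loop entered, a second
-- row reachable) A's slices wrap around via Python negative indexing and emit empty
-- or overlapping rows, while B emits the clean contiguous triangular rows, the
-- intended partition (the counters are internal and every real call starts them at zero).
def D_gen_triangle (lst : List Int) (i : Int) (j : Int) (k : Int) : Prop :=
  (i ≤ -2 ∨ k ≤ -2) ∧ j + i < (lst.length : Int) ∧
    (k + i + 2 < (lst.length : Int) ∨ (-1 ≤ i ∧ i + 2 ≤ (lst.length : Int) ∧ i + k + 3 ≤ 0))
instance (lst : List Int) (i : Int) (j : Int) (k : Int) : Decidable (D_gen_triangle lst i j k) := by unfold D_gen_triangle; infer_instance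

def Spec_gen_triangle (lst : List Int) (i : Int) (j : Int) (k : Int) (out : List (List Int)) : Prop := ¬ D_gen_triangle lst i j k → out = gen_triangle_alt lst i j k
instance (lst : List Int) (i : Int) (j : Int) (k : Int) (out : List (List Int)) : Decidable (Spec_gen_triangle lst i j k out) := by unfold Spec_gen_triangle; infer_instance

def pvDiffWitness_gen_triangle : List Int × Int × Int × Int := ([1, 2, 3, 4], 0, 0, -3)
def pvDiffWitnessOut_gen_triangle : (List (List Int)) × (List (List Int)) :=
  ([[1, 2], [], [1, 2, 3]], [[1, 2], [3, 4]])

-- ===== CLAIM (what is proved, stated in full; the proofs are below) =====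
def Claim_unchanged_gen_triangle : Prop := ∀ (lst : List Int) (i : Int) (j : Int) (k : Int), Dom_gen_triangle lst i j k → Spec_gen_triangle lst i j k (gen_triangle lst i j k)
def Claim_changed_gen_triangle : Prop := Dom_gen_triangle (pvDiffWitness_gen_triangle.1) (pvDiffWitness_gen_triangle.2.1) (pvDiffWitness_gen_triangle.2.2.1) (pvDiffWitness_gen_triangle.2.2.2) ∧ D_gen_triangle (pvDiffWitness_gen_triangle.1) (pvDiffWitness_gen_triangle.2.1) (pvDiffWitness_gen_triangle.2.2.1) (pvDiffWitness_gen_triangle.2.2.2) ∧ gen_triangle (pvDiffWitness_gen_triangle.1) (pvDiffWitness_gen_triangle.2.1) (pvDiffWitness_gen_triangle.2.2.1) (pvDiffWitness_gen_triangle.2.2.2) = pvDiffWitnessOut_gen_triangle.1 ∧ gen_triangle_alt (pvDiffWitness_gen_triangle.1) (pvDiffWitness_gen_triangle.2.1) (pvDiffWitness_gen_triangle.2.2.1) (pvDiffWitness_gen_triangle.2.2.2) = pvDiffWitnessOut_gen_triangle.2 ∧ pvDiffWitnessOut_gen_triangle.1 ≠ pvDiffWitnessOut_gen_triangle.2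

-- ===== LEMMAS AND PROOFS =====

-- A's while loop returns the accumulator at once when its condition fails
theorem loopA_stop (lst : List Int) (tri : List (List Int)) (i j k : Int)
    (h : ¬ (j + i < (lst.length : Int))) : ∀ fuel, loopA lst tri i j k fuel = tri := by
  intro fuel
  cases fuel with
  | zero => rfl
  | succ f => rw [loopA, if_neg h]

-- A's fuel is always a successor (exposes the first loop unfolding)
theorem fuelA_succ (lst : List Int) (i j k : Int) :
    fuelA lst i j k
      = ((-(i + 2)).toNat + (-(i + 2)).toNat * (-(i + 2)).toNat + ((lst.length : Int) - k).toNat + 3) + 1 := by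
  unfold fuelA
  omega

-- one non-flushing step of B's fold
theorem stepB_no (acc : List (List Int)) (row : List Int) (t : Int) (x : Int)
    (h : ¬ (((row ++ [x]).length : Int) = t)) :
    stepB (acc, row, t) x = (acc, row ++ [x], t) := by
  simp only [stepB]
  rw [if_neg h]

-- the flushing step of B's fold
theorem stepB_yes (acc : List (List Int)) (row : List Int) (t : Int) (x : Int)
    (h : ((row ++ [x]).length : Int) = t) :
    stepB (acc, row, t) x = (acc ++ [row ++ [x]], [], t + 1) := by
  simp only [stepB]
  rw [if_pos h]

-- B's fold never flushes a row when the target is unreachable (too few elements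
-- remain, or the target is non-positive)
theorem noflush (ys : List Int) : ∀ (acc : List (List Int)) (row : List Int) (t : Int),
    ((row.length : Int) + ys.length < t ∨ t ≤ 0) →
    (ys.foldl stepB (acc, row, t)).1 = acc := by
  induction ys with
  | nil => intro acc row t _; rfl
  | cons x ys ih =>
      intro acc row t h
      have hlen : ((x :: ys).length : Int) = ys.length + 1 := by simp
      rw [hlen] at h
      have hne : ¬ (((row ++ [x]).length : Int) = t) := by
        have : ((row ++ [x]).length : Int) = row.length + 1 := by
          simp only [List.length_append, List.length_cons, List.length_nil]
          push_cast
          omega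
        rw [this]
        omega
      rw [List.foldl_cons, stepB_no acc row t x hne]
      apply ih
      have : (((row ++ [x]).length : Int)) = row.length + 1 := by
        simp only [List.length_append, List.length_cons, List.length_nil]
        push_cast
        omega
      rw [this]
      omega

-- B's fold flushes exactly when the row fills up to the target length
theorem fill (rest : List Int) : ∀ (ys : List Int) (acc : List (List Int)) (row : List Int) (t : Int),
    ys ≠ [] → (row.length : Int) + ys.length = t →
    (ys ++ rest).foldl stepB (acc, row, t) = rest.foldl stepB (acc ++ [row ++ ys], [], t + 1) := by
  intro ys
  induction ys with
  | nil => intro _ _ _ h _; exact absurd rfl h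
  | cons x ys ih =>
      intro acc row t _ hlen
      have hxl : ((x :: ys).length : Int) = ys.length + 1 := by simp
      rw [hxl] at hlen
      have hrl : (((row ++ [x]).length : Int)) = row.length + 1 := by
        simp only [List.length_append, List.length_cons, List.length_nil]
        push_cast
        omega
      cases ys with
      | nil =>
          have hfull : ((row ++ [x]).length : Int) = t := by
            rw [hrl]
            simp only [List.length_nil] at hlen
            omega
          rw [List.cons_append, List.nil_append, List.foldl_cons, stepB_yes acc row t x hfull]
      | cons y ys' =>
          have hne : ¬ (((row ++ [x]).length : Int) = t) := by
            rw [hrl]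
            have : (0 : Int) ≤ ((y :: ys').length : Int) - 1 := by simp
            omega
          rw [List.cons_append, List.foldl_cons, stepB_no acc row t x hne]
          have := ih acc (row ++ [x]) t (by simp) (by
            rw [hrl]
            have : (((y :: ys').length : Int)) = ys'.length + 1 := by simp
            rw [this] at hlen ⊢
            omega)
          simpa using this

-- on a clean state (start s ≥ 0, target t ≥ 1) A's slicing loop computes exactly
-- B's element-wise chunking fold over the remaining elements
theorem loopA_eq_foldB (lst : List Int) : ∀ (fuel : Nat) (s : Nat) (t : Int) (acc : List (List Int)),
    1 ≤ t → (lst.length : Int) - s + 1 ≤ fuel →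
    loopA lst acc (t - 1) (s : Int) ((s : Int) + t - 1) fuel
      = ((lst.drop s).foldl stepB (acc, [], t)).1 := by
  intro fuel
  induction fuel with
  | zero =>
      intro s t acc _ hf
      have hdrop : lst.drop s = [] := List.drop_eq_nil_of_le (by omega)
      rw [hdrop]
      rfl
  | succ fuel ih =>
      intro s t acc ht hf
      by_cases c : (s : Int) + (t - 1) < (lst.length : Int)
      · rw [loopA, if_pos c]
        have hchunklen : (( (lst.drop s).take t.toNat).length : Int) = t := by
          simp only [List.length_take, List.length_drop]
          push_cast
          omega
        have hslice : PySem.List.slice lst (some (s : Int)) (some ((s : Int) + t - 1 + 1))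
            = (lst.drop s).take t.toNat := by
          have h1 : (s : Int) + t - 1 + 1 = (s : Int) + (t.toNat : Int) := by omega
          rw [h1, PySem.List.slice_natCast_add]
        have hsplit : lst.drop s = (lst.drop s).take t.toNat ++ lst.drop (s + t.toNat) := by
          conv_lhs => rw [← List.take_append_drop t.toNat (lst.drop s)]
          congr 1
          rw [List.drop_drop]
        conv_rhs => rw [hsplit]
        rw [hslice]
        rw [fill (lst.drop (s + t.toNat)) ((lst.drop s).take t.toNat) acc [] t
              (by intro he; rw [he] at hchunklen; simp at hchunklen; omega)
              (by simpa using hchunklen)]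
        have harg1 : t - 1 + 1 = (t + 1) - 1 := by omega
        have harg2 : (s : Int) + t - 1 + 1 = ((s + t.toNat : Nat) : Int) := by push_cast; omega
        have harg3 : (s : Int) + t - 1 + 1 + (t - 1 + 1) = ((s + t.toNat : Nat) : Int) + (t + 1) - 1 := by
          push_cast; omega
        rw [harg3, harg1, harg2]
        have := ih (s + t.toNat) (t + 1) (acc ++ [[] ++ (lst.drop s).take t.toNat])
          (by omega) (by push_cast; omega)
        simpa using this
      · rw [loopA, if_neg c]
        have hlen : (((lst.drop s).length : Int)) < t := by
          simp only [List.length_drop]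
          omega
        rw [noflush (lst.drop s) acc [] t (by simp only [List.length_nil]; omega)]

-- the clamped start index of B's tail slice, as written in D_
theorem clampIdx_cast (lst : List Int) (a : Int) :
    ((PySem.List.clampIdx lst.length a : Nat) : Int)
      = (if a < 0 then max 0 ((lst.length : Int) + a) else min a (lst.length : Int)) := by
  by_cases ha : a < 0
  · have hk : 0 < (-a).toNat := by omega
    have hae : a = -(((-a).toNat : Nat) : Int) := by omega
    rw [hae, PySem.List.clampIdx_neg_natCast _ _ hk, if_pos (by omega)]
    omega
  · have hae : a = ((a.toNat : Nat) : Int) := by omega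
    rw [hae, PySem.List.clampIdx_natCast, if_neg (by omega)]
    omega

-- ===== VERDICT =====
theorem gen_triangle_spec : Claim_unchanged_gen_triangle := by
  intro lst i j k _dom hnd
  unfold D_gen_triangle at hnd
  unfold gen_triangle gen_triangle_alt
  by_cases h1 : j + i < (lst.length : Int)
  · rw [if_neg (by omega), fuelA_succ, loopA, if_pos h1]
    by_cases h2 : -1 ≤ i ∧ -1 ≤ k
    · -- clean state: the general chunking lemma applies from the second iteration on
      obtain ⟨hi, hk⟩ := h2
      have hs : (((k + 1).toNat : Nat) : Int) = k + 1 := by omega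
      have key : ∀ (acc : List (List Int)) (fuel : Nat), (lst.length : Int) - (k + 1) + 1 ≤ fuel →
          loopA lst acc (i + 1) (k + 1) ((k + 1) + (i + 1)) fuel
            = ((lst.drop (k + 1).toNat).foldl stepB (acc, [], i + 2)).1 := by
        intro acc fuel hfl
        have h := loopA_eq_foldB lst fuel (k + 1).toNat (i + 2) acc (by omega) (by rw [hs]; omega)
        rw [hs] at h
        have e1 : i + 2 - 1 = i + 1 := by omega
        have e2 : k + 1 + (i + 2) - 1 = (k + 1) + (i + 1) := by omega
        rw [e1, e2] at h
        exact h
      rw [key _ _ (by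
        generalize (-(i + 2)).toNat * (-(i + 2)).toNat = b
        omega)]
      rw [PySem.List.slice_from lst (show (0 : Int) ≤ k + 1 by omega)]
      simp
    · -- degenerate state outside D_: A stops after the first row, B never flushes
      have hik : i ≤ -2 ∨ k ≤ -2 := by omega
      have hstop : ¬ ((k + 1) + (i + 1) < (lst.length : Int)) := by
        by_contra hc
        exact hnd ⟨hik, h1, Or.inl (by omega)⟩
      rw [loopA_stop lst _ _ _ _ hstop]
      rw [PySem.List.slice_some_none]
      have hnof : ((lst.drop (PySem.List.clampIdx lst.length (k + 1))).foldl stepB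
          ([PySem.List.slice lst (some j) (some (k + 1))], [], i + 2)).1
          = [PySem.List.slice lst (some j) (some (k + 1))] := by
        apply noflush
        by_cases hi2 : i + 2 ≤ 0
        · right; omega
        · left
          have hR : ¬ (-1 ≤ i ∧ i + 2 ≤ (lst.length : Int) ∧ i + k + 3 ≤ 0) := by
            by_contra hc
            exact hnd ⟨hik, h1, Or.inr hc⟩
          have hcl := clampIdx_cast lst (k + 1)
          have hle : PySem.List.clampIdx lst.length (k + 1) ≤ lst.length := PySem.List.clampIdx_le _ _
          simp only [List.length_nil, List.length_drop]
          -- here -1 ≤ i, so (i ≤ -2 ∨ k ≤ -2) forces k + 1 < 0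
          rw [if_pos (show k + 1 < 0 by omega)] at hcl
          omega
      rw [hnof]
      simp
  · rw [if_pos (by omega), fuelA_succ, loopA, if_neg h1]

theorem gen_triangle_changed : Claim_changed_gen_triangle := by
  unfold Claim_changed_gen_triangle
  decide
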